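-- pv_equiv track=rewrite | github.com/JaredLGillespie/InterviewBit | Python/amazing-subarrays.py | solve
-- ===== SOURCE A (Python) =====
-- def solve(A):
--     vowels = {'a', 'e', 'i', 'o', 'u', 'A', 'E', 'I', 'O', 'U'}
--     n = len(A)
--
--     substrings = 0
--     for i in range(n):
--         if A[i] in vowels:
--             substrings = (substrings + n - i) % 10003
--     return substrings % 10003
-- ===== SOURCE B (Python) =====
-- def solve(A):
--     vowels = set('aeiouAEIOU')
--     count = 0
--     total = 0
--     for ch in A:
--         if ch in vowels:
--             count += 1
--         total = (total + count) % 10003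
--     return total % 10003
-- ===== Notes on version B (the rewrite author's own statement) =====
-- stated objective: alternative
-- what changed: Instead of adding the suffix length n-i for each vowel position, B sweeps once keeping a running vowel count and adds, for every endpoint j, the number of vowels in A[0..j] (the amazing substrings ending at j), taking mod 10003 each step.
import Mathlib
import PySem

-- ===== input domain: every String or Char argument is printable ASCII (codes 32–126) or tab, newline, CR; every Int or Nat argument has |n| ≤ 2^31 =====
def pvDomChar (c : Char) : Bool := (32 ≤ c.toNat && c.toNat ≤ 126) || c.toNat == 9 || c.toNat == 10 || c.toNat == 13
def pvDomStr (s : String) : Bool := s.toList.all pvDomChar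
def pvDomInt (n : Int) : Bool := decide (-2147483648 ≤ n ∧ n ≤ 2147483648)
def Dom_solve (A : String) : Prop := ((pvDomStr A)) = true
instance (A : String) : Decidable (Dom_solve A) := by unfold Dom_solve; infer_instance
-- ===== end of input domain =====

-- B counts, for each endpoint, the vowels in the prefix ending there (a different
-- decomposition of the same sum); same O(n) cost, exact same values.

-- ===== PORT A =====
-- membership in the vowel set {'a','e','i','o','u','A','E','I','O','U'} (same literal set in A and B)
def pvVowel (c : Char) : Bool := ['a','e','i','o','u','A','E','I','O','U'].contains c

-- for i in range(n): if A[i] in vowels: substrings = (substrings + n - i) % 10003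
-- (A[i] is always in range here; pyGetD's default is never read)
def solve (A : String) : Int :=
  let cs := A.toList
  let n : Int := cs.length
  let substrings :=
    (PySem.List.pyRange 0 n 1).foldl
      (fun substrings i =>
        if pvVowel (PySem.List.pyGetD cs i ' ') then PySem.Int.mod (substrings + n - i) 10003
        else substrings) 0
  PySem.Int.mod substrings 10003

-- ===== PORT B =====
-- one sweep over the characters, state = (count of vowels so far, running total mod 10003)
def solve_alt (A : String) : Int :=
  let st := A.toList.foldl
    (fun (st : Int × Int) c =>
      let count := if pvVowel c then st.1 + 1 else st.1
      (count, PySem.Int.mod (st.2 + count) 10003)) (0, 0)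
  PySem.Int.mod st.2 10003

-- ===== PRECONDITION & SPEC =====
def Spec_solve (A : String) (out : Int) : Prop := out = solve_alt A
instance (A : String) (out : Int) : Decidable (Spec_solve A out) := by unfold Spec_solve; infer_instance

-- ===== CLAIM (what is proved, stated in full; the proofs are below) =====
def Claim_equal_solve : Prop := ∀ (A : String), Dom_solve A → Spec_solve A (solve A)

-- ===== LEMMAS AND PROOFS =====

-- plain (mod-free) versions of the two loops
def pvPA (cs : List Char) : Int :=
  (PySem.List.pyRange 0 (cs.length : Int) 1).foldl
    (fun acc i => if pvVowel (PySem.List.pyGetD cs i ' ') then acc + ((cs.length : Int) - i) else acc) 0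

def pvGB (st : Int × Int) (c : Char) : Int × Int :=
  let count := if pvVowel c then st.1 + 1 else st.1
  (count, st.2 + count)

-- A's fold with the per-step mod equals the plain fold, mod 10003
theorem pvModFoldA (l : List Int) (q : Int → Bool) (w : Int → Int) (s : Int) :
    l.foldl (fun acc i => if q i then PySem.Int.mod (acc + w i) 10003 else acc)
      (PySem.Int.mod s 10003)
    = PySem.Int.mod (l.foldl (fun acc i => if q i then acc + w i else acc) s) 10003 := by
  induction l generalizing s with
  | nil => rfl
  | cons i l ih =>
    simp only [List.foldl_cons]
    by_cases h : q i = true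
    · simp only [h, if_pos]
      rw [show PySem.Int.mod (PySem.Int.mod s 10003 + w i) 10003
            = PySem.Int.mod (s + w i) 10003 by
        simp [Int.emod_add_emod]]
      exact ih (s + w i)
    · simp only [if_neg h]
      exact ih s

-- B's fold with the per-step mod: same first component, second component mod 10003
theorem pvModFoldB (cs : List Char) (c0 t : Int) :
    cs.foldl
      (fun (st : Int × Int) c =>
        ((if pvVowel c then st.1 + 1 else st.1),
         PySem.Int.mod (st.2 + (if pvVowel c then st.1 + 1 else st.1)) 10003)) (c0, PySem.Int.mod t 10003)
    = ((cs.foldl pvGB (c0, t)).1, PySem.Int.mod (cs.foldl pvGB (c0, t)).2 10003) := by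
  induction cs generalizing c0 t with
  | nil => rfl
  | cons c cs ih =>
    simp only [List.foldl_cons, pvGB]
    rw [show PySem.Int.mod (PySem.Int.mod t 10003 + (if pvVowel c then c0 + 1 else c0)) 10003
          = PySem.Int.mod (t + (if pvVowel c then c0 + 1 else c0)) 10003 by
      simp [Int.emod_add_emod]]
    exact ih _ _

-- shifting B's plain fold state
theorem pvGB_shift (cs : List Char) (c0 t : Int) :
    cs.foldl pvGB (c0, t) =
      ((cs.foldl pvGB (0, 0)).1 + c0,
       (cs.foldl pvGB (0, 0)).2 + t + c0 * cs.length) := by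
  induction cs generalizing c0 t with
  | nil => simp
  | cons c cs ih =>
    simp only [List.foldl_cons, pvGB, List.length_cons]
    by_cases h : pvVowel c = true
    · simp only [h, if_true]
      rw [ih (c0+1) (t+(c0+1)), ih (0+1) (0+(0+1))]
      simp only [Prod.mk.injEq]
      constructor
      · ring
      · push_cast; ring
    · simp only [if_neg h]
      rw [ih c0 (t+c0), ih 0 (0+0)]
      simp only [Prod.mk.injEq]
      constructor
      · ring
      · push_cast; ring

-- adding to the initial accumulator of a conditional-add fold adds to the result
theorem pvFoldl_add_init {α : Type} (l : List α) (q : α → Bool) (w : α → Int) (a s : Int) :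
    l.foldl (fun acc i => if q i then acc + w i else acc) (a + s)
    = a + l.foldl (fun acc i => if q i then acc + w i else acc) s := by
  induction l generalizing s with
  | nil => rfl
  | cons i l ih =>
    simp only [List.foldl_cons]
    by_cases h : q i = true
    · simp only [h, if_pos, add_assoc]; exact ih (s + w i)
    · simp only [if_neg h]
      exact ih s

-- A's plain loop, cons recurrence
theorem pvPA_cons (c : Char) (cs : List Char) :
    pvPA (c :: cs) = (if pvVowel c then ((cs.length : Int) + 1) else 0) + pvPA cs := by
  unfold pvPA
  simp only [List.length_cons]
  rw [show ((cs.length + 1 : Nat) : Int) = (cs.length : Int) + 1 by push_cast; ring]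
  rw [PySem.List.pyRange_one_cons (by positivity : (0:Int) < (cs.length:Int)+1)]
  simp only [List.foldl_cons]
  rw [show PySem.List.pyGetD (c :: cs) 0 ' ' = c from by
    simp [pysem]]
  simp only [zero_add]
  rw [PySem.List.pyRange_one 1 ((cs.length:Int)+1), PySem.List.pyRange_one 0 (cs.length:Int)]
  simp only [add_sub_cancel_right, sub_zero, Int.toNat_natCast, List.foldl_map]
  have hb : (fun (acc : Int) (k : Nat) =>
        if pvVowel (PySem.List.pyGetD (c :: cs) (1 + (k:Int)) ' ') then
          acc + ((cs.length : Int) + 1 - (1 + (k:Int))) else acc)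
      = (fun (acc : Int) (k : Nat) =>
        if pvVowel (PySem.List.pyGetD cs (0 + (k:Int)) ' ') then
          acc + ((cs.length : Int) - (0 + (k:Int))) else acc) := by
    funext acc k
    rw [show (1 + (k:Int)) = ((k+1 : Nat) : Int) by push_cast; ring,
        show ((0:Int) + (k:Int)) = ((k : Nat) : Int) by ring,
        PySem.List.pyGetD_natCast, PySem.List.pyGetD_natCast]
    simp only [List.getD_cons_succ]
    rw [show ((cs.length : Int) + 1 - ((k+1 : Nat) : Int)) = (cs.length : Int) - ((k:Nat):Int) by push_cast; ring]
  rw [hb]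
  conv_lhs => rw [show (if pvVowel c = true then ((cs.length:Int) + 1) else 0)
        = (if pvVowel c = true then ((cs.length:Int) + 1) else 0) + 0 from (add_zero _).symm]
  exact pvFoldl_add_init _ _ _ _ 0

-- the two plain loops compute the same number
theorem pvPA_eq (cs : List Char) : pvPA cs = (cs.foldl pvGB (0, 0)).2 := by
  induction cs with
  | nil => rfl
  | cons c cs ih =>
    rw [pvPA_cons, ih]
    simp only [List.foldl_cons, pvGB]
    by_cases h : pvVowel c = true
    · simp only [h, if_true]
      rw [pvGB_shift cs (0+1) (0+(0+1))]
      push_cast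
      ring
    · simp only [if_neg h]
      rw [pvGB_shift cs 0 (0+0)]
      push_cast
      ring

-- ===== VERDICT (by name: the statement is the Claim_ definition above) =====
-- idempotence of the final %
theorem pvModMod (x : Int) : PySem.Int.mod (PySem.Int.mod x 10003) 10003 = PySem.Int.mod x 10003 := by
  simp [Int.emod_emod_of_dvd]

theorem solve_spec : Claim_equal_solve := by
  intro A _
  unfold Spec_solve
  simp only [solve, solve_alt]
  simp only [add_sub_assoc]
  have hA := pvModFoldA (PySem.List.pyRange 0 (A.toList.length : Int) 1)
      (fun i => pvVowel (PySem.List.pyGetD A.toList i ' '))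
      (fun i => (A.toList.length : Int) - i) 0
  rw [show PySem.Int.mod 0 10003 = 0 from rfl] at hA
  have hB := pvModFoldB A.toList 0 0
  rw [show PySem.Int.mod 0 10003 = 0 from rfl] at hB
  rw [hA, hB, pvModMod, pvModMod]
  have h := pvPA_eq A.toList
  unfold pvPA at h
  rw [h]
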